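-- pv_equiv track=rewrite | github.com/vveed-vi/lifequest-webapp | ADHDTelegramHelper/utils/constants.py | get_level_name
-- ===== SOURCE A (Python) =====
-- XP_LEVELS = {
--     0: "Beginner",
--     100: "Regular",
--     300: "Consistent",
--     600: "Dedicated",
--     1000: "Master of Habits",
--     2000: "ADHD Ninja"
-- }
--
-- def get_level_name(xp: int) -> str:
--     """Get the level name for a given amount of XP."""
--     level_name = "Beginner"
--     for threshold, name in sorted(XP_LEVELS.items()):
--         if xp >= threshold:
--             level_name = name
--         else:
--             break
--     return level_name
-- ===== SOURCE B (Python) =====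
-- import bisect
--
-- XP_LEVELS = {
--     0: "Beginner",
--     100: "Regular",
--     300: "Consistent",
--     600: "Dedicated",
--     1000: "Master of Habits",
--     2000: "ADHD Ninja"
-- }
--
-- _THRESHOLDS = sorted(XP_LEVELS)
-- _NAMES = [XP_LEVELS[t] for t in _THRESHOLDS]
--
-- def get_level_name(xp: int) -> str:
--     """Get the level name for a given amount of XP."""
--     i = bisect.bisect_right(_THRESHOLDS, xp)
--     return "Beginner" if i == 0 else _NAMES[i - 1]
-- ===== Notes on version B (the rewrite author's own statement) =====
-- stated objective: idiomatic
-- what changed: Replaced the scan-and-break loop over sorted dict items with a precomputed sorted thresholds/names pair and a bisect_right binary-search lookup.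
import Mathlib
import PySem

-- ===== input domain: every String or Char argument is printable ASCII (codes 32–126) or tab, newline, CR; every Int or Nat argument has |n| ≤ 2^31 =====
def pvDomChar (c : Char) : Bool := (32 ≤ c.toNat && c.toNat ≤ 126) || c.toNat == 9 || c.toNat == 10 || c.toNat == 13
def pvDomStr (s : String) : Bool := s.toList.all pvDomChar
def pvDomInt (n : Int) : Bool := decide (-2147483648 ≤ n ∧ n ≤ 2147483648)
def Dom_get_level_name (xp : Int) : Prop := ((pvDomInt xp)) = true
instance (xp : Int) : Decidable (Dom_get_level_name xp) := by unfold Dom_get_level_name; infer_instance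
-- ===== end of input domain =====

-- B replaces A's scan-and-break over sorted dict items by a bisect_right binary search
-- over a precomputed sorted threshold list (idiomatic; same values everywhere).

-- ===== PORT A =====
-- sorted(XP_LEVELS.items()) — the dict's items sorted by key
-- keys are distinct, so sorting the items by key equals Python's tuple sort
def xpLevelsSorted : List (Int × String) :=
  PySem.List.sorted [(0, "Beginner"), (100, "Regular"), (300, "Consistent"),
    (600, "Dedicated"), (1000, "Master of Habits"), (2000, "ADHD Ninja")]
    (fun p => p.1) false

-- the for-loop with break: carries level_name, stops at the first threshold > xp
def aLoop (xp : Int) : List (Int × String) → String → String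
  | [], acc => acc
  | (t, n) :: rest, acc => if xp ≥ t then aLoop xp rest n else acc

def get_level_name (xp : Int) : String :=
  aLoop xp xpLevelsSorted "Beginner"

-- ===== PORT B =====
def bThresholds : List Int := [0, 100, 300, 600, 1000, 2000]
def bNames : List String :=
  ["Beginner", "Regular", "Consistent", "Dedicated", "Master of Habits", "ADHD Ninja"]

-- bisect.bisect_right(a, x) with lo/hi bounds, as in CPython
def bisectRight (a : List Int) (x : Int) (lo hi : Nat) : Nat :=
  if h : lo < hi then
    let mid := (lo + hi) / 2
    if x < a.getD mid 0 then bisectRight a x lo mid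
    else bisectRight a x (mid + 1) hi
  else lo
termination_by hi - lo
decreasing_by all_goals omega

def get_level_name_alt (xp : Int) : String :=
  let i := bisectRight bThresholds xp 0 bThresholds.length
  if i = 0 then "Beginner" else bNames.getD (i - 1) ""

-- ===== PRECONDITION & SPEC =====
def Spec_get_level_name (xp : Int) (out : String) : Prop := out = get_level_name_alt xp
instance (xp : Int) (out : String) : Decidable (Spec_get_level_name xp out) := by unfold Spec_get_level_name; infer_instance

-- ===== CLAIM (what is proved, stated in full; the proofs are below) =====
def Claim_equal_get_level_name : Prop := ∀ (xp : Int), Dom_get_level_name xp → Spec_get_level_name xp (get_level_name xp)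

-- ===== LEMMAS AND PROOFS =====
theorem xpLevelsSorted_eq : xpLevelsSorted =
    [(0, "Beginner"), (100, "Regular"), (300, "Consistent"),
     (600, "Dedicated"), (1000, "Master of Habits"), (2000, "ADHD Ninja")] := by
  decide

-- ===== VERDICT (by name: the statement is the Claim_ definition above) =====
theorem get_level_name_spec : Claim_equal_get_level_name := by
  intro xp _
  unfold Spec_get_level_name get_level_name get_level_name_alt
  by_cases h0 : xp < 0
  · simp [aLoop, xpLevelsSorted_eq, bisectRight, bThresholds, bNames, h0,
      show ¬ (0:Int) ≤ xp from by omega, show xp < 100 from by omega,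
      show xp < 600 from by omega]
  · by_cases h1 : xp < 100
    · simp [aLoop, xpLevelsSorted_eq, bisectRight, bThresholds, bNames,
        show (0:Int) ≤ xp from by omega, show ¬ (100:Int) ≤ xp from by omega,
        show ¬ xp < 0 from by omega, h1, show xp < 600 from by omega]
    · by_cases h2 : xp < 300
      · simp [aLoop, xpLevelsSorted_eq, bisectRight, bThresholds, bNames,
          show (0:Int) ≤ xp from by omega, show (100:Int) ≤ xp from by omega,
          show ¬ (300:Int) ≤ xp from by omega, show ¬ xp < 100 from by omega,
          h2, show xp < 600 from by omega]
      · by_cases h3 : xp < 600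
        · simp [aLoop, xpLevelsSorted_eq, bisectRight, bThresholds, bNames,
            show (0:Int) ≤ xp from by omega, show (100:Int) ≤ xp from by omega,
            show (300:Int) ≤ xp from by omega, show ¬ (600:Int) ≤ xp from by omega,
            show ¬ xp < 300 from by omega, h3,
            show ¬ xp < 100 from by omega, show ¬ xp < 0 from by omega]
        · by_cases h4 : xp < 1000
          · simp [aLoop, xpLevelsSorted_eq, bisectRight, bThresholds, bNames,
              show (0:Int) ≤ xp from by omega, show (100:Int) ≤ xp from by omega,
              show (300:Int) ≤ xp from by omega, show (600:Int) ≤ xp from by omega,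
              show ¬ (1000:Int) ≤ xp from by omega, show ¬ xp < 600 from by omega, h4,
              show xp < 2000 from by omega]
          · by_cases h5 : xp < 2000
            · simp [aLoop, xpLevelsSorted_eq, bisectRight, bThresholds, bNames,
                show (0:Int) ≤ xp from by omega, show (100:Int) ≤ xp from by omega,
                show (300:Int) ≤ xp from by omega, show (600:Int) ≤ xp from by omega,
                show (1000:Int) ≤ xp from by omega, show ¬ (2000:Int) ≤ xp from by omega,
                show ¬ xp < 600 from by omega, show ¬ xp < 1000 from by omega, h5]
            · simp [aLoop, xpLevelsSorted_eq, bisectRight, bThresholds, bNames,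
                show (0:Int) ≤ xp from by omega, show (100:Int) ≤ xp from by omega,
                show (300:Int) ≤ xp from by omega, show (600:Int) ≤ xp from by omega,
                show (1000:Int) ≤ xp from by omega, show (2000:Int) ≤ xp from by omega,
                show ¬ xp < 600 from by omega, show ¬ xp < 1000 from by omega,
                show ¬ xp < 2000 from by omega]
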